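-- pv_equiv track=rewrite | github.com/disposight/Disposight | backend/app/contacts/email_validator.py | _prioritize_pattern
-- ===== SOURCE A (Python) =====
-- def _prioritize_pattern(
--     permutations: list[tuple[str, str]], cached_pattern: str
-- ) -> list[tuple[str, str]]:
--     """Reorder permutations to try cached pattern first."""
--     prioritized = []
--     rest = []
--     for email, pattern_name in permutations:
--         if pattern_name == cached_pattern:
--             prioritized.append((email, pattern_name))
--         else:
--             rest.append((email, pattern_name))
--     return prioritized + rest
-- ===== SOURCE B (Python) =====
-- def _prioritize_pattern(
--     permutations: list[tuple[str, str]], cached_pattern: str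
-- ) -> list[tuple[str, str]]:
--     """Reorder permutations to try cached pattern first."""
--     return sorted(permutations, key=lambda ep: ep[1] != cached_pattern)
-- ===== Notes on version B (the rewrite author's own statement) =====
-- stated objective: idiomatic
-- what changed: Replaced the two-accumulator partition loop with a single stable sort on the boolean key 'pattern != cached_pattern', whose stability reproduces 'prioritized + rest' exactly.
import Mathlib
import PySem

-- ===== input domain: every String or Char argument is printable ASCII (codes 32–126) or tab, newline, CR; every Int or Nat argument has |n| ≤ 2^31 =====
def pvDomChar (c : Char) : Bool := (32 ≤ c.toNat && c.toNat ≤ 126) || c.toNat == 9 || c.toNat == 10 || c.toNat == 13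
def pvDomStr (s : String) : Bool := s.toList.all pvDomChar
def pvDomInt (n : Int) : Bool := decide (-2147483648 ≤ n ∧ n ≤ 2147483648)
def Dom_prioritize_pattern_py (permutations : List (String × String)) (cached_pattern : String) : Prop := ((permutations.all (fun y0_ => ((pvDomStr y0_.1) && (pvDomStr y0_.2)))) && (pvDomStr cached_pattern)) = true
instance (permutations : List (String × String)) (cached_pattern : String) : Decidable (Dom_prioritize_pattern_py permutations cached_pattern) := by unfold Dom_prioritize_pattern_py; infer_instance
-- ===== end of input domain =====

-- B replaces A's two-accumulator partition loop with one stable sort on the key "pattern != cached_pattern" (idiomatic; same return value, no mutation).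


-- ===== PORT A =====
-- the for-loop building the two accumulators 'prioritized' and 'rest'
def prioritize_pattern_py (permutations : List (String × String)) (cached_pattern : String) : List (String × String) :=
  let s := permutations.foldl
    (fun (acc : List (String × String) × List (String × String)) ep =>
      if ep.2 == cached_pattern then (acc.1 ++ [ep], acc.2) else (acc.1, acc.2 ++ [ep]))
    ([], [])
  s.1 ++ s.2

-- ===== PORT B =====
-- sorted(permutations, key=lambda ep: ep[1] != cached_pattern); the Bool key is ordered False(0) < True(1)
def prioritize_pattern_py_alt (permutations : List (String × String)) (cached_pattern : String) : List (String × String) :=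
  PySem.List.sorted permutations (fun ep => if ep.2 != cached_pattern then (1 : Nat) else 0) false

-- ===== PRECONDITION & SPEC =====
def Spec_prioritize_pattern_py (permutations : List (String × String)) (cached_pattern : String) (out : List (String × String)) : Prop := out = prioritize_pattern_py_alt permutations cached_pattern
instance (permutations : List (String × String)) (cached_pattern : String) (out : List (String × String)) : Decidable (Spec_prioritize_pattern_py permutations cached_pattern out) := by unfold Spec_prioritize_pattern_py; infer_instance

-- ===== CLAIM (what is proved, stated in full; the proofs are below) =====
def Claim_equal_prioritize_pattern_py : Prop := ∀ (permutations : List (String × String)) (cached_pattern : String), Dom_prioritize_pattern_py permutations cached_pattern → Spec_prioritize_pattern_py permutations cached_pattern (prioritize_pattern_py permutations cached_pattern)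

-- ===== LEMMAS AND PROOFS =====

-- inserting x before every element it is 'before' and after every element it is not
theorem insertBy_split {α : Type} (before : α → α → Bool) (x : α) (p r : List α)
    (hp : ∀ y ∈ p, before x y = false) (hr : ∀ y ∈ r, before x y = true) :
    PySem.List.insertBy before x (p ++ r) = p ++ x :: r := by
  induction p with
  | nil =>
      cases r with
      | nil => simp [PySem.List.insertBy]
      | cons y ys => simp [PySem.List.insertBy, hr y (by simp)]
  | cons a p' ih =>
      have ha : before x a = false := hp a (by simp)
      simp only [List.cons_append, PySem.List.insertBy, ha, Bool.false_eq_true, if_false]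
      simpa using ih (fun y hy => hp y (by simp [hy]))

-- the stable insertion sort on a 0/1 key partitions: key-0 elements (in order), then key-1 elements
theorem sorted_foldl_partition (cp : String) (xs p r : List (String × String))
    (hp : ∀ y ∈ p, (y.2 == cp) = true) (hr : ∀ y ∈ r, (y.2 == cp) = false) :
    List.foldl (fun acc x => PySem.List.insertBy
        (fun a b => decide ((if a.2 != cp then (1:Nat) else 0) < (if b.2 != cp then (1:Nat) else 0))) x acc)
      (p ++ r) xs
    = (p ++ xs.filter (fun y => y.2 == cp)) ++ (r ++ xs.filter (fun y => !(y.2 == cp))) := by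
  induction xs generalizing p r with
  | nil => simp
  | cons x xs ih =>
      by_cases hx : (x.2 == cp) = true
      · have hins : PySem.List.insertBy
            (fun a b => decide ((if a.2 != cp then (1:Nat) else 0) < (if b.2 != cp then (1:Nat) else 0))) x (p ++ r)
            = (p ++ [x]) ++ r := by
          rw [insertBy_split _ _ p r
            (fun y hy => by simp [bne, hx, hp y hy])
            (fun y hy => by simp [bne, hx, hr y hy])]
          simp
        have hp' : ∀ y ∈ p ++ [x], (y.2 == cp) = true := by
          intro y hy
          rcases List.mem_append.mp hy with h | h
          · exact hp y h
          · simp at h; simp [h, hx]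
        simp only [List.foldl_cons, hins]
        rw [ih (p ++ [x]) r hp' hr]
        simp [List.filter_cons, hx]
      · have hx' : (x.2 == cp) = false := by simpa using hx
        have hins : PySem.List.insertBy
            (fun a b => decide ((if a.2 != cp then (1:Nat) else 0) < (if b.2 != cp then (1:Nat) else 0))) x (p ++ r)
            = p ++ (r ++ [x]) := by
          rw [show p ++ (r ++ [x]) = (p ++ r) ++ [x] by simp]
          refine PySem.List.insertBy_of_forall_not_before _ _ _ ?_
          intro y hy
          rcases List.mem_append.mp hy with h | h
          · simp [bne, hx', hp y h]
          · simp [bne, hx', hr y h]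
        have hr' : ∀ y ∈ r ++ [x], (y.2 == cp) = false := by
          intro y hy
          rcases List.mem_append.mp hy with h | h
          · exact hr y h
          · simp at h; simp [h, hx']
        simp only [List.foldl_cons, hins]
        rw [ih p (r ++ [x]) hp hr']
        simp [List.filter_cons, hx']

-- A's loop computes the two filters
theorem foldA_partition (cp : String) (xs : List (String × String)) (p r : List (String × String)) :
    List.foldl
      (fun (acc : List (String × String) × List (String × String)) ep =>
        if ep.2 == cp then (acc.1 ++ [ep], acc.2) else (acc.1, acc.2 ++ [ep]))
      (p, r) xs
    = (p ++ xs.filter (fun y => y.2 == cp), r ++ xs.filter (fun y => !(y.2 == cp))) := by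
  induction xs generalizing p r with
  | nil => simp
  | cons x xs ih =>
      by_cases hx : (x.2 == cp) = true
      · simp only [List.foldl_cons, hx, if_pos]
        rw [ih (p ++ [x]) r]
        simp [List.filter_cons, hx]
      · have hx' : (x.2 == cp) = false := by simpa using hx
        simp only [List.foldl_cons, hx', Bool.false_eq_true, if_false]
        rw [ih p (r ++ [x])]
        simp [List.filter_cons, hx']

-- ===== VERDICT (by name: the statement is the Claim_ definition above) =====
theorem prioritize_pattern_py_spec : Claim_equal_prioritize_pattern_py := by
  intro perms cp _
  unfold Spec_prioritize_pattern_py prioritize_pattern_py prioritize_pattern_py_alt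
  rw [PySem.List.sorted_eq_foldl_insertBy]
  have hB := sorted_foldl_partition cp perms [] [] (by simp) (by simp)
  simp only [List.nil_append] at hB
  rw [hB, foldA_partition]
  simp
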